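-- pv_equiv track=rewrite | github.com/tina1401-strg/PandA-25-26-IR-Starter-Repo-6 | part6/app.py | ansi_highlight
-- ===== SOURCE A (Python) =====
-- def ansi_highlight(text: str, spans):
--     """Return text with ANSI highlight escape codes inserted."""
--     if not spans:
--         return text
--
--     spans = sorted(spans)
--     merged = []
--
--     # Merge overlapping spans
--     current_start, current_end = spans[0]
--     for s, e in spans[1:]:
--         if s <= current_end:
--             current_end = max(current_end, e)
--         else:
--             merged.append((current_start, current_end))
--             current_start, current_end = s, e
--     merged.append((current_start, current_end))
--
--     # Build highlighted string
--     out = []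
--     i = 0
--     for s, e in merged:
--         out.append(text[i:s])
--         out.append("\033[43m\033[30m")  # yellow background, black text
--         out.append(text[s:e])
--         out.append("\033[0m")           # reset
--         i = e
--     out.append(text[i:])
--     return "".join(out)
-- ===== SOURCE B (Python) =====
-- def _merge(sp):
--     """Merged groups of a sorted span list, by divide and conquer."""
--     if len(sp) == 1:
--         return [sp[0]]
--     mid = len(sp) // 2
--     left = _merge(sp[:mid])
--     right = _merge(sp[mid:])
--     cs, ce = left[-1]
--     k = 0
--     while k < len(right) and right[k][0] <= ce:
--         if right[k][1] > ce:
--             ce = right[k][1]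
--         k += 1
--     return left[:-1] + [(cs, ce)] + right[k:]
--
--
-- def ansi_highlight(text: str, spans):
--     """Return text with ANSI highlight escape codes inserted."""
--     if not spans:
--         return text
--     merged = _merge(sorted(spans))
--     return "".join(
--         text[p:c] + "\033[43m\033[30m" + text[c:d] + "\033[0m"
--         for p, (c, d) in zip([0] + [d for _, d in merged], merged)
--     ) + text[merged[-1][1]:]
-- ===== Notes on version B (the rewrite author's own statement) =====
-- stated objective: alternative
-- what changed: Replaces A's sequential merge loop over a (current_start, current_end) state pair by a divide-and-conquer interval merge (recursive halves combined by absorbing the right half's leading groups into the left half's last group), and A's cursor-driven emit loop by a zip comprehension pairing each merged span with its predecessor's end.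
import Mathlib
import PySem

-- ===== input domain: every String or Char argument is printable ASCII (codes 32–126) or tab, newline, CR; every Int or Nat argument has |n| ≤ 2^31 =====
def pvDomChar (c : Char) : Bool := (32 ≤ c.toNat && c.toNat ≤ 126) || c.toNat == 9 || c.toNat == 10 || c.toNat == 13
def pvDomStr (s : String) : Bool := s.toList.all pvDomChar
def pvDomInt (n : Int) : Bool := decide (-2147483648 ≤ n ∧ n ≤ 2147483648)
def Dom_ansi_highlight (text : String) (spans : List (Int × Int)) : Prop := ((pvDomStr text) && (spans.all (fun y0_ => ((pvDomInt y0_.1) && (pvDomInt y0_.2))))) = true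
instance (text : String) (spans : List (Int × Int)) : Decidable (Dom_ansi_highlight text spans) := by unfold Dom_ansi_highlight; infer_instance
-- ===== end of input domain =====

-- B replaces A's sequential state-pair merge loop and cursor-driven emit loop by a
-- divide-and-conquer interval merge and a zip-comprehension emission; same cost,
-- different algorithm.

-- "\033[43m\033[30m" (yellow background, black text) and "\033[0m" (reset)
def pvHL : List Char := "\x1b[43m\x1b[30m".toList
def pvReset : List Char := "\x1b[0m".toList

-- ===== PORT A =====
-- A's merge loop: state (current_start, current_end), emitting merged spans in order.
def pvMergeA : List (Int × Int) → Int → Int → List (Int × Int)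
  | [], cs, ce => [(cs, ce)]
  | (s, e) :: rest, cs, ce =>
      if s ≤ ce then pvMergeA rest cs (max ce e)
      else (cs, ce) :: pvMergeA rest s e

-- A's build loop: out list of string pieces, cursor i; final piece text[i:].
def pvEmitA (t : List Char) : List (Int × Int) → List (List Char) → Int → List (List Char)
  | [], out, i => out ++ [PySem.Chars.slice t (some i) none]
  | (s, e) :: ms, out, i =>
      pvEmitA t ms
        (out ++ [PySem.Chars.slice t (some i) (some s), pvHL,
                 PySem.Chars.slice t (some s) (some e), pvReset]) e

def ansi_highlight (text : String) (spans : List (Int × Int)) : String :=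
  if spans = [] then text
  else
    match PySem.List.sorted2 spans Prod.fst Prod.snd with   -- sorted(spans): lexicographic on pairs
    | [] => text   -- unreachable: spans ≠ []
    | (cs, ce) :: rest =>
        String.ofList (PySem.Chars.join [] (pvEmitA text.toList (pvMergeA rest cs ce) [] 0))

-- ===== PORT B =====
-- B's inner while loop: absorb the leading groups of `right` into (cs, ce) while they
-- touch it, i.e. [(cs, ce)] + right[k:] with ce grown; indexed while → structural recursion.
def pvAbsorb (cs ce : Int) : List (Int × Int) → List (Int × Int)
  | [] => [(cs, ce)]
  | (c, d) :: r =>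
      if c ≤ ce then pvAbsorb cs (if d > ce then d else ce) r
      else (cs, ce) :: (c, d) :: r

-- B's _merge: divide and conquer over the sorted span list (python recurses only on
-- nonempty lists; length ≤ 1 returns [sp[0]] = sp, which also makes [] total here).
def pvMergeB (sp : List (Int × Int)) : List (Int × Int) :=
  if _h : sp.length ≤ 1 then sp
  else
    let mid := sp.length / 2
    let left := pvMergeB (sp.take mid)
    let right := pvMergeB (sp.drop mid)
    match left.getLast? with
    | none => right   -- unreachable: left of a nonempty half is nonempty
    | some lastSpan => left.dropLast ++ pvAbsorb lastSpan.1 lastSpan.2 right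
termination_by sp.length
decreasing_by
  · simp only [List.length_take]
    omega
  · simp only [List.length_drop]
    omega

def ansi_highlight_alt (text : String) (spans : List (Int × Int)) : String :=
  if spans = [] then text
  else
    let merged := pvMergeB (PySem.List.sorted2 spans Prod.fst Prod.snd)
    match merged.getLast? with
    | none => text   -- unreachable: merged is nonempty
    | some lastSpan =>
        -- "".join(text[p:c] + HL + text[c:d] + RESET
        --         for p, (c, d) in zip([0] + [d for _, d in merged], merged)) + text[merged[-1][1]:]
        String.ofList
          (PySem.Chars.join []
            ((((0 : Int) :: merged.map Prod.snd).zip merged).map (fun pr =>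
              PySem.Chars.slice text.toList (some pr.1) (some pr.2.1) ++ pvHL ++
              PySem.Chars.slice text.toList (some pr.2.1) (some pr.2.2) ++ pvReset))
          ++ PySem.Chars.slice text.toList (some lastSpan.2) none)

-- ===== PRECONDITION & SPEC =====
def Spec_ansi_highlight (text : String) (spans : List (Int × Int)) (out : String) : Prop := out = ansi_highlight_alt text spans
instance (text : String) (spans : List (Int × Int)) (out : String) : Decidable (Spec_ansi_highlight text spans out) := by unfold Spec_ansi_highlight; infer_instance

-- ===== CLAIM (what is proved, stated in full; the proofs are below) =====
def Claim_equal_ansi_highlight : Prop := ∀ (text : String) (spans : List (Int × Int)), Dom_ansi_highlight text spans → Spec_ansi_highlight text spans (ansi_highlight text spans)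

-- ===== LEMMAS AND PROOFS =====

-- "".join of the pieces is their flattening.
theorem pv_join_nil_flatten (parts : List (List Char)) :
    PySem.Chars.join [] parts = parts.flatten := by
  induction parts with
  | nil => rfl
  | cons p ps ih =>
      cases ps with
      | nil => simp [PySem.Chars.join, List.intercalate]
      | cons q qs =>
          rw [PySem.Chars.join_cons_cons]
          simp only [List.flatten_cons] at ih ⊢
          simp [ih]

theorem pvEmitA_acc (t : List Char) (ms : List (Int × Int)) : ∀ (acc : List (List Char)) (i : Int),
    pvEmitA t ms acc i = acc ++ pvEmitA t ms [] i := by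
  induction ms with
  | nil => intro acc i; simp [pvEmitA]
  | cons x ms ih =>
      intro acc i
      obtain ⟨s, e⟩ := x
      simp only [pvEmitA]
      rw [ih, ih ([] ++ _)]
      simp

theorem pvMergeA_ne_nil (l : List (Int × Int)) : ∀ (cs ce : Int), pvMergeA l cs ce ≠ [] := by
  induction l with
  | nil => intro cs ce; simp [pvMergeA]
  | cons x l ih =>
      intro cs ce
      obtain ⟨s, e⟩ := x
      by_cases h : s ≤ ce
      · simpa [pvMergeA, h] using ih cs (max ce e)
      · simp [pvMergeA, h]

-- the head of an absorb keeps its start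
theorem pvAbsorb_head (L : List (Int × Int)) : ∀ (s e : Int),
    ∃ m r, pvAbsorb s e L = (s, m) :: r := by
  induction L with
  | nil => intro s e; exact ⟨e, [], rfl⟩
  | cons x L ih =>
      intro s e
      obtain ⟨c, d⟩ := x
      by_cases h : c ≤ e
      · obtain ⟨m, r, hr⟩ := ih s (if d > e then d else e)
        exact ⟨m, r, by simpa [pvAbsorb, h] using hr⟩
      · exact ⟨e, (c, d) :: L, by simp [pvAbsorb, h]⟩

-- absorbing into a closed group just prepends it
theorem pvAbsorb_gt (L : List (Int × Int)) (s e cs ce : Int) (h : ¬ s ≤ ce) :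
    pvAbsorb cs ce (pvAbsorb s e L) = (cs, ce) :: pvAbsorb s e L := by
  obtain ⟨m, r, hr⟩ := pvAbsorb_head L s e
  rw [hr]
  simp [pvAbsorb, h]

-- absorbing twice is absorbing once with the grown end
theorem pvAbsorb_absorb (L : List (Int × Int)) : ∀ (s e cs ce : Int), s ≤ ce →
    pvAbsorb cs ce (pvAbsorb s e L) = pvAbsorb cs (max ce e) L := by
  induction L with
  | nil =>
      intro s e cs ce h
      simp only [pvAbsorb, if_pos h]
      rw [show (if e > ce then e else ce) = max ce e by split <;> omega]
  | cons x L ih =>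
      intro s e cs ce h
      obtain ⟨c, d⟩ := x
      by_cases hc : c ≤ e
      · rw [show pvAbsorb s e ((c, d) :: L) = pvAbsorb s (if d > e then d else e) L by
          simp [pvAbsorb, hc]]
        rw [ih s (if d > e then d else e) cs ce h]
        rw [show pvAbsorb cs (max ce e) ((c, d) :: L)
            = pvAbsorb cs (if d > max ce e then d else max ce e) L by
          simp [pvAbsorb, show c ≤ max ce e by omega]]
        congr 1
        split <;> split <;> omega
      · rw [show pvAbsorb s e ((c, d) :: L) = (s, e) :: (c, d) :: L by simp [pvAbsorb, hc]]
        rw [show pvAbsorb cs ce ((s, e) :: (c, d) :: L)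
            = pvAbsorb cs (if e > ce then e else ce) ((c, d) :: L) by simp [pvAbsorb, h]]
        rw [show (if e > ce then e else ce) = max ce e by split <;> omega]

-- CRUX: running A's merge from a live group equals absorbing the independent merge
theorem pv_crux (ys : List (Int × Int)) : ∀ (s e cs ce : Int),
    pvMergeA ((s, e) :: ys) cs ce = pvAbsorb cs ce (pvMergeA ys s e) := by
  induction ys with
  | nil =>
      intro s e cs ce
      by_cases h : s ≤ ce
      · simp [pvMergeA, pvAbsorb, h, show (if e > ce then e else ce) = max ce e by split <;> omega]
      · simp [pvMergeA, pvAbsorb, h]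
  | cons y ys ih =>
      intro s e cs ce
      obtain ⟨s2, e2⟩ := y
      by_cases h : s ≤ ce
      · rw [show pvMergeA ((s, e) :: (s2, e2) :: ys) cs ce
            = pvMergeA ((s2, e2) :: ys) cs (max ce e) by simp [pvMergeA, h]]
        rw [ih s2 e2 cs (max ce e)]
        rw [show pvMergeA ((s2, e2) :: ys) s e = pvAbsorb s e (pvMergeA ys s2 e2) from ih s2 e2 s e]
        rw [pvAbsorb_absorb _ s e cs ce h]
      · rw [show pvMergeA ((s, e) :: (s2, e2) :: ys) cs ce
            = (cs, ce) :: pvMergeA ((s2, e2) :: ys) s e by simp [pvMergeA, h]]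
        rw [show pvMergeA ((s2, e2) :: ys) s e = pvAbsorb s e (pvMergeA ys s2 e2) from ih s2 e2 s e]
        rw [pvAbsorb_gt _ s e cs ce h]

-- splitting A's merge at any point: merge the tail part independently and absorb it
theorem pv_split (xs : List (Int × Int)) : ∀ (s e : Int) (ys : List (Int × Int)) (cs ce : Int),
    pvMergeA (xs ++ (s, e) :: ys) cs ce
      = (pvMergeA xs cs ce).dropLast
        ++ pvAbsorb (pvMergeA xs cs ce).getLast!.1 (pvMergeA xs cs ce).getLast!.2
            (pvMergeA ys s e) := by
  induction xs with
  | nil =>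
      intro s e ys cs ce
      simp only [List.nil_append, pvMergeA, List.getLast!, List.dropLast]
      exact pv_crux ys s e cs ce
  | cons x xs ih =>
      intro s e ys cs ce
      obtain ⟨a, b⟩ := x
      by_cases h : a ≤ ce
      · rw [show pvMergeA (((a, b) :: xs) ++ (s, e) :: ys) cs ce
            = pvMergeA (xs ++ (s, e) :: ys) cs (max ce b) by simp [pvMergeA, h]]
        rw [show pvMergeA ((a, b) :: xs) cs ce = pvMergeA xs cs (max ce b) by simp [pvMergeA, h]]
        exact ih s e ys cs (max ce b)
      · rw [show pvMergeA (((a, b) :: xs) ++ (s, e) :: ys) cs ce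
            = (cs, ce) :: pvMergeA (xs ++ (s, e) :: ys) a b by simp [pvMergeA, h]]
        rw [show pvMergeA ((a, b) :: xs) cs ce = (cs, ce) :: pvMergeA xs a b by simp [pvMergeA, h]]
        rw [ih s e ys a b]
        rcases hmm : pvMergeA xs a b with _ | ⟨z, zs⟩
        · exact absurd hmm (pvMergeA_ne_nil xs a b)
        · simp [List.getLast!]

theorem pv_getD_getLast (zs : List (Int × Int)) : ∀ (z : Int × Int) (h : (z :: zs) ≠ []),
    zs.getLast?.getD z = (z :: zs).getLast h := by
  induction zs with
  | nil => intro z h; simp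
  | cons b t ih =>
      intro z h
      rw [List.getLast_cons (by simp), ← ih b (by simp)]
      cases t with
      | nil => simp
      | cons c u =>
          rcases hq : (c :: u).getLast? with _ | q
          · simp [List.getLast?_eq_none_iff] at hq
          · simp [hq]

-- B's divide-and-conquer merge computes A's sequential merge
theorem pvMergeB_eq (n : Nat) : ∀ (x : Int × Int) (l : List (Int × Int)),
    (x :: l).length ≤ n → pvMergeB (x :: l) = pvMergeA l x.1 x.2 := by
  induction n with
  | zero => intro x l h; simp at h
  | succ n ih =>
      intro x l hlen
      by_cases hone : (x :: l).length ≤ 1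
      · have : l = [] := by cases l <;> simp_all
        subst this
        rw [pvMergeB]
        simp [pvMergeA]
      · rw [pvMergeB]
        simp only [dif_neg hone]
        have hll : (x :: l).length = l.length + 1 := by simp
        have hlen2 : 2 ≤ (x :: l).length := by omega
        set mid := (x :: l).length / 2 with hmid
        have hmid1 : 1 ≤ mid := by omega
        have hmidlt : mid < (x :: l).length := by omega
        have hmidle : mid - 1 ≤ l.length := by omega
        -- the two halves
        have htake : (x :: l).take mid = x :: l.take (mid - 1) := by
          have hk : mid = (mid - 1) + 1 := by omega
          rw [hk, List.take_succ_cons]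
          simp
        have hdropne : l.drop (mid - 1) ≠ [] := by
          intro h
          have h2 := List.length_drop (l := l) (i := mid - 1)
          rw [h] at h2
          simp at h2
          omega
        rcases hd : l.drop (mid - 1) with _ | ⟨y, ys⟩
        · exact absurd hd hdropne
        · have hdrop : (x :: l).drop mid = y :: ys := by
            have hk : mid = (mid - 1) + 1 := by omega
            rw [hk, List.drop_succ_cons, hd]
          have hyslen : (y :: ys).length = l.length - (mid - 1) := by
            rw [← hd, List.length_drop]
          have hlefts : (x :: l.take (mid - 1)).length ≤ n := by
            simp only [List.length_cons, List.length_take, Nat.min_eq_left hmidle]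
            simp only [List.length_cons] at hlen
            omega
          have hrights : (y :: ys).length ≤ n := by
            simp only [List.length_cons] at hlen hmidlt ⊢
            simp only [List.length_cons] at hyslen
            omega
          rw [htake, hdrop, ih x (l.take (mid - 1)) hlefts, ih y ys hrights]
          rcases hy : y with ⟨s, e⟩
          have hsplit : l = l.take (mid - 1) ++ (s, e) :: ys := by
            rw [← hy, ← hd, List.take_append_drop]
          rw [show pvMergeA l x.1 x.2 = pvMergeA (l.take (mid - 1) ++ (s, e) :: ys) x.1 x.2 by
            rw [← hsplit]]
          rw [pv_split (l.take (mid - 1)) s e ys x.1 x.2]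
          rcases hmm : pvMergeA (l.take (mid - 1)) x.1 x.2 with _ | ⟨z, zs⟩
          · exact absurd hmm (pvMergeA_ne_nil _ _ _)
          · simp [List.getLast!, List.getLast?_cons, pv_getD_getLast]

-- emission: A's cursor loop equals B's zip over (previous end, span) pairs
theorem pvEmit_eq (t : List Char) (ms : List (Int × Int)) : ∀ (i : Int) (la : Int × Int),
    ms.getLast? = some la →
    (pvEmitA t ms [] i).flatten
      = ((((i : Int) :: ms.map Prod.snd).zip ms).map (fun pr =>
            PySem.Chars.slice t (some pr.1) (some pr.2.1) ++ pvHL ++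
            PySem.Chars.slice t (some pr.2.1) (some pr.2.2) ++ pvReset)).flatten
        ++ PySem.Chars.slice t (some la.2) none := by
  induction ms with
  | nil => intro i la h; simp at h
  | cons x ms ih =>
      intro i la h
      obtain ⟨c, d⟩ := x
      rcases hm : ms with _ | ⟨y, ms'⟩
      · subst hm
        simp only [List.getLast?_singleton, Option.some_inj] at h
        subst h
        simp [pvEmitA, List.flatten, List.append_assoc]
      · rw [← hm]
        have hms : ms ≠ [] := by rw [hm]; simp
        have hla : ms.getLast? = some la := by
          rw [← h, hm, List.getLast?_cons_cons]
        rw [show pvEmitA t ((c, d) :: ms) [] i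
            = pvEmitA t ms ([] ++ [PySem.Chars.slice t (some i) (some c), pvHL,
                PySem.Chars.slice t (some c) (some d), pvReset]) d from rfl]
        rw [pvEmitA_acc]
        simp only [List.nil_append, List.flatten_append]
        rw [ih d la hla]
        rw [show ((i : Int) :: ((c, d) :: ms).map Prod.snd).zip ((c, d) :: ms)
            = (i, (c, d)) :: ((d :: ms.map Prod.snd).zip ms) from rfl]
        simp [List.append_assoc]

-- ===== VERDICT (by name: the statement is the Claim_ definition above) =====
theorem ansi_highlight_spec : Claim_equal_ansi_highlight := by
  intro text spans _
  unfold Spec_ansi_highlight ansi_highlight ansi_highlight_alt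
  by_cases hnil : spans = []
  · simp [hnil]
  · simp only [if_neg hnil]
    rcases hs : PySem.List.sorted2 spans Prod.fst Prod.snd with _ | ⟨⟨cs, ce⟩, rest⟩
    · exact absurd ((hs ▸ PySem.List.sorted2_perm spans Prod.fst Prod.snd false
        : ([] : List (Int × Int)).Perm spans).symm.eq_nil) hnil
    · rw [pvMergeB_eq ((cs, ce) :: rest).length (cs, ce) rest (le_refl _)]
      show String.ofList (PySem.Chars.join [] (pvEmitA text.toList (pvMergeA rest cs ce) [] 0)) = _
      rcases hmm : pvMergeA rest cs ce with _ | ⟨z, zs⟩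
      · exact absurd hmm (pvMergeA_ne_nil rest cs ce)
      · rcases hla : (z :: zs).getLast? with _ | la
        · simp at hla
        · congr 1
          rw [pv_join_nil_flatten, pv_join_nil_flatten]
          exact pvEmit_eq text.toList (z :: zs) 0 la hla
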